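-- pv_equiv track=rewrite | github.com/sharronesofer/visual_dm | backend/scripts/tasks/task56_phase2_continue_refactoring.py | _determine_module_for_function
-- ===== SOURCE A (Python) =====
-- from typing import Dict, List, Tuple, Set, Optional
--
-- def _determine_module_for_function(func_name: str, target_modules: Dict[str, Dict[str, int]]) -> str:
--     """Determine which module a function should go to based on naming"""
--     func_lower = func_name.lower()
--
--     # Simple heuristics based on function names
--     if any(keyword in func_lower for keyword in ['damage', 'hit', 'attack']):
--         return next((mod for mod in target_modules.keys() if 'damage' in mod), list(target_modules.keys())[0])
--     elif any(keyword in func_lower for keyword in ['status', 'effect', 'condition']):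
--         return next((mod for mod in target_modules.keys() if 'status' in mod or 'effect' in mod), list(target_modules.keys())[0])
--     elif any(keyword in func_lower for keyword in ['validate', 'check', 'verify']):
--         return next((mod for mod in target_modules.keys() if 'validation' in mod), list(target_modules.keys())[0])
--     elif any(keyword in func_lower for keyword in ['route', 'endpoint', 'api']):
--         return next((mod for mod in target_modules.keys() if 'router' in mod), list(target_modules.keys())[0])
--
--     return list(target_modules.keys())[0]  # Default to first module
-- ===== SOURCE B (Python) =====
-- from typing import Dict
--
-- # Category substrings (index = priority) and a flat keyword->category table.
-- _CAT_SUBS = [['damage'], ['status', 'effect'], ['validation'], ['router']]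
-- _KEYWORD_CAT = [('damage', 0), ('hit', 0), ('attack', 0),
--                 ('status', 1), ('effect', 1), ('condition', 1),
--                 ('validate', 2), ('check', 2), ('verify', 2),
--                 ('route', 3), ('endpoint', 3), ('api', 3)]
--
-- def _determine_module_for_function(func_name: str, target_modules: Dict[str, Dict[str, int]]) -> str:
--     keys = list(target_modules.keys())
--     default = keys[0]
--     low = func_name.lower()
--     # Stage 1: one pass over the keys, indexing them by category
--     # (first key matching each category's substrings).
--     slots = [None, None, None, None]
--     for m in keys:
--         for ci, subs in enumerate(_CAT_SUBS):
--             if slots[ci] is None and any(s in m for s in subs):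
--                 slots[ci] = m
--     # Stage 2: the function's category = lowest category index among matched keywords.
--     cats = [c for kw, c in _KEYWORD_CAT if kw in low]
--     if not cats:
--         return default
--     chosen = slots[min(cats)]
--     return chosen if chosen is not None else default
-- ===== Notes on version B (the rewrite author's own statement) =====
-- stated objective: alternative
-- what changed: Replaces the if/elif cascade whose taken branch re-scans the keys with a two-stage algorithm: one pass over the keys builds a category->first-matching-key index (slots), the function's category is computed as the minimum category index over a flat keyword->category table, and the answer is a single slot lookup.
import Mathlib
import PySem

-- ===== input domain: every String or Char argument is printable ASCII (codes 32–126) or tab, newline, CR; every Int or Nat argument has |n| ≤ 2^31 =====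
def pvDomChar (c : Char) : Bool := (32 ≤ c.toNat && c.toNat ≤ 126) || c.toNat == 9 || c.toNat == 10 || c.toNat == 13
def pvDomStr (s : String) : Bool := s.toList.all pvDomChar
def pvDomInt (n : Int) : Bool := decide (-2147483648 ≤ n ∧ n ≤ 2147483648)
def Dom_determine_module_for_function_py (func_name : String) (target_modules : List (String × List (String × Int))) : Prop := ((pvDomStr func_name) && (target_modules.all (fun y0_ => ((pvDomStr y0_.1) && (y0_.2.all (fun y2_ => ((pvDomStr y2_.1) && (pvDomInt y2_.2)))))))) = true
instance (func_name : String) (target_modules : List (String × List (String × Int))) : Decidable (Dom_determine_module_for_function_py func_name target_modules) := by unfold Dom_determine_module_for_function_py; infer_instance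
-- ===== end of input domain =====

-- B replaces A's if/elif cascade (each branch re-scanning the keys) by two staged passes:
-- one pass over the keys indexing them by category, then a min-index category pick;
-- objective: alternative. Pre_ excludes the empty dict, on which the Python A raises IndexError.

-- ===== PORT A =====
-- literal transliteration: lower the name, then the if/elif cascade; list(keys)[0]
-- is keys.headD "" since Pre_ guarantees nonempty keys (Python raises IndexError on empty).
def determine_module_for_function_py (func_name : String) (target_modules : List (String × List (String × Int))) : String :=
  let func_lower := PySem.Str.lower func_name
  let keys := (PySem.Dict.ofList target_modules).keys
  if ["damage", "hit", "attack"].any (fun k => PySem.Str.isIn k func_lower) then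
    ((keys.find? (fun m => PySem.Str.isIn "damage" m)).getD (keys.headD ""))
  else if ["status", "effect", "condition"].any (fun k => PySem.Str.isIn k func_lower) then
    ((keys.find? (fun m => PySem.Str.isIn "status" m || PySem.Str.isIn "effect" m)).getD (keys.headD ""))
  else if ["validate", "check", "verify"].any (fun k => PySem.Str.isIn k func_lower) then
    ((keys.find? (fun m => PySem.Str.isIn "validation" m)).getD (keys.headD ""))
  else if ["route", "endpoint", "api"].any (fun k => PySem.Str.isIn k func_lower) then
    ((keys.find? (fun m => PySem.Str.isIn "router" m)).getD (keys.headD ""))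
  else
    keys.headD ""

-- ===== PORT B =====
-- the data tables of Source B
def pvCatSubs : List (List String) :=
  [["damage"], ["status", "effect"], ["validation"], ["router"]]
def pvKeywordCats : List (String × Int) :=
  [("damage", 0), ("hit", 0), ("attack", 0),
   ("status", 1), ("effect", 1), ("condition", 1),
   ("validate", 2), ("check", 2), ("verify", 2),
   ("route", 3), ("endpoint", 3), ("api", 3)]

-- literal transliteration of Source B: slots pass over the keys, then minimal category of
-- the matched keywords, then slot lookup (list indexing via pyGetD/pySetD is exact;
-- indices come from enumerate / the literal table). keys[0] is keys.headD "" as in port A.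
def determine_module_for_function_py_alt (func_name : String) (target_modules : List (String × List (String × Int))) : String :=
  let keys := (PySem.Dict.ofList target_modules).keys
  let dflt := keys.headD ""
  let low := PySem.Str.lower func_name
  let slots := keys.foldl (fun s m =>
      (PySem.List.enumerate pvCatSubs).foldl (fun s p =>
        if PySem.List.pyGetD s p.1 none = none ∧ p.2.any (fun sub => PySem.Str.isIn sub m) then
          PySem.List.pySetD s p.1 (some m)
        else s) s)
    ([none, none, none, none] : List (Option String))
  let cats := (pvKeywordCats.filter (fun p => PySem.Str.isIn p.1 low)).map Prod.snd
  match PySem.List.min? cats (fun x => x) with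
  | none => dflt
  | some c =>
    match PySem.List.pyGetD slots c none with
    | some m => m
    | none => dflt

-- ===== PRECONDITION & SPEC =====
-- Pre_ excludes only target_modules = [], where the Python A raises IndexError.
def Pre_determine_module_for_function_py (func_name : String) (target_modules : List (String × List (String × Int))) : Prop := target_modules ≠ []
instance (func_name : String) (target_modules : List (String × List (String × Int))) : Decidable (Pre_determine_module_for_function_py func_name target_modules) := by unfold Pre_determine_module_for_function_py; infer_instance

def pvWitness_determine_module_for_function_py : String × (List (String × List (String × Int))) := ("do_attack", [("combat_damage", []), ("misc", [])])

def Spec_determine_module_for_function_py (func_name : String) (target_modules : List (String × List (String × Int))) (out : String) : Prop := out = determine_module_for_function_py_alt func_name target_modules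
instance (func_name : String) (target_modules : List (String × List (String × Int))) (out : String) : Decidable (Spec_determine_module_for_function_py func_name target_modules out) := by unfold Spec_determine_module_for_function_py; infer_instance

-- ===== CLAIM (what is proved, stated in full; the proofs are below) =====
def Claim_equal_determine_module_for_function_py : Prop := ∀ (func_name : String) (target_modules : List (String × List (String × Int))), Dom_determine_module_for_function_py func_name target_modules → Pre_determine_module_for_function_py func_name target_modules → Spec_determine_module_for_function_py func_name target_modules (determine_module_for_function_py func_name target_modules)

-- ===== LEMMAS AND PROOFS =====

-- the four category predicates on a module name
def pvP0 (m : String) : Bool := PySem.Str.isIn "damage" m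
def pvP1 (m : String) : Bool := PySem.Str.isIn "status" m || PySem.Str.isIn "effect" m
def pvP2 (m : String) : Bool := PySem.Str.isIn "validation" m
def pvP3 (m : String) : Bool := PySem.Str.isIn "router" m

-- one outer step of B's slots loop, on a 4-slot state, evaluated
set_option maxHeartbeats 2000000 in
lemma pvInner_eval (a b c d : Option String) (m : String) :
    (PySem.List.enumerate pvCatSubs).foldl (fun s p =>
        if PySem.List.pyGetD s p.1 none = none ∧ p.2.any (fun sub => PySem.Str.isIn sub m) then
          PySem.List.pySetD s p.1 (some m)
        else s) [a, b, c, d]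
    = [if a = none ∧ pvP0 m then some m else a,
       if b = none ∧ pvP1 m then some m else b,
       if c = none ∧ pvP2 m then some m else c,
       if d = none ∧ pvP3 m then some m else d] := by
  have e0 : PySem.List.enumerate pvCatSubs =
      [(0, ["damage"]), (1, ["status", "effect"]), (2, ["validation"]), (3, ["router"])] := by
    simp [pvCatSubs, PySem.List.enumerate_cons]
  rw [e0]
  simp only [List.foldl_cons, List.foldl_nil, List.any_cons, List.any_nil, Bool.or_false,
    pvP0, pvP1, pvP2, pvP3]
  have g0 : ∀ (x y z w v : Option String), PySem.List.pyGetD [x,y,z,w] (0:Int) v = x := fun _ _ _ _ _ => rfl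
  have g1 : ∀ (x y z w v : Option String), PySem.List.pyGetD [x,y,z,w] (1:Int) v = y := fun _ _ _ _ _ => rfl
  have g2 : ∀ (x y z w v : Option String), PySem.List.pyGetD [x,y,z,w] (2:Int) v = z := fun _ _ _ _ _ => rfl
  have g3 : ∀ (x y z w v : Option String), PySem.List.pyGetD [x,y,z,w] (3:Int) v = w := fun _ _ _ _ _ => rfl
  have s0 : ∀ (x y z w v : Option String), PySem.List.pySetD [x,y,z,w] (0:Int) v = [v,y,z,w] := fun _ _ _ _ _ => rfl
  have s1 : ∀ (x y z w v : Option String), PySem.List.pySetD [x,y,z,w] (1:Int) v = [x,v,z,w] := fun _ _ _ _ _ => rfl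
  have s2 : ∀ (x y z w v : Option String), PySem.List.pySetD [x,y,z,w] (2:Int) v = [x,y,v,w] := fun _ _ _ _ _ => rfl
  have s3 : ∀ (x y z w v : Option String), PySem.List.pySetD [x,y,z,w] (3:Int) v = [x,y,z,v] := fun _ _ _ _ _ => rfl
  simp only [apply_ite (fun s => PySem.List.pyGetD s (1:Int) (none : Option String)),
    apply_ite (fun s => PySem.List.pyGetD s (2:Int) (none : Option String)),
    apply_ite (fun s => PySem.List.pyGetD s (3:Int) (none : Option String)),
    apply_ite (fun s => PySem.List.pySetD s (1:Int) (some m)),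
    apply_ite (fun s => PySem.List.pySetD s (2:Int) (some m)),
    apply_ite (fun s => PySem.List.pySetD s (3:Int) (some m)),
    g0, g1, g2, g3, s0, s1, s2, s3, ite_self]
  split_ifs <;> simp_all

-- one slot combined with one more key, for the induction step below
lemma pvStep_or (x : Option String) (P : String → Bool) (m : String) (keys : List String) :
    (if x = none ∧ P m = true then some m else x).or (keys.find? P)
      = x.or ((m :: keys).find? P) := by
  cases x <;> by_cases h : P m = true <;> simp [List.find?, h, Option.or]

-- B's whole slots loop, characterised: each slot is its initial value or else the
-- first key satisfying that category's predicate
lemma pvOuter_eval (keys : List String) : ∀ (a b c d : Option String),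
    keys.foldl (fun s m =>
      (PySem.List.enumerate pvCatSubs).foldl (fun s p =>
        if PySem.List.pyGetD s p.1 none = none ∧ p.2.any (fun sub => PySem.Str.isIn sub m) then
          PySem.List.pySetD s p.1 (some m)
        else s) s) [a, b, c, d]
    = [a.or (keys.find? pvP0), b.or (keys.find? pvP1),
       c.or (keys.find? pvP2), d.or (keys.find? pvP3)] := by
  induction keys with
  | nil => intro a b c d; simp [List.foldl]
  | cons m keys ih =>
    intro a b c d
    rw [List.foldl_cons, pvInner_eval, ih]
    simp only [pvStep_or]

-- the category list of Source B
def pvCatsOf (low : String) : List Int :=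
  (pvKeywordCats.filter (fun p => PySem.Str.isIn p.1 low)).map Prod.snd

lemma pvMem_catsOf (low : String) (x : Int) :
    x ∈ pvCatsOf low ↔
      ((PySem.Str.isIn "damage" low = true ∨ PySem.Str.isIn "hit" low = true ∨ PySem.Str.isIn "attack" low = true) ∧ x = 0) ∨
      ((PySem.Str.isIn "status" low = true ∨ PySem.Str.isIn "effect" low = true ∨ PySem.Str.isIn "condition" low = true) ∧ x = 1) ∨
      ((PySem.Str.isIn "validate" low = true ∨ PySem.Str.isIn "check" low = true ∨ PySem.Str.isIn "verify" low = true) ∧ x = 2) ∨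
      ((PySem.Str.isIn "route" low = true ∨ PySem.Str.isIn "endpoint" low = true ∨ PySem.Str.isIn "api" low = true) ∧ x = 3) := by
  simp only [pvCatsOf, pvKeywordCats, List.mem_map, List.mem_filter, List.mem_cons,
    List.not_mem_nil, or_false, PySem.Str.isIn_eq]
  constructor
  · rintro ⟨p, ⟨hmem, hin⟩, hx⟩
    rcases hmem with rfl|rfl|rfl|rfl|rfl|rfl|rfl|rfl|rfl|rfl|rfl|rfl <;> simp_all
  · rintro (⟨h, rfl⟩ | ⟨h, rfl⟩ | ⟨h, rfl⟩ | ⟨h, rfl⟩) <;> rcases h with h|h|h <;>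
      [ exact ⟨("damage", 0), ⟨by tauto, h⟩, rfl⟩
      ; exact ⟨("hit", 0), ⟨by tauto, h⟩, rfl⟩
      ; exact ⟨("attack", 0), ⟨by tauto, h⟩, rfl⟩
      ; exact ⟨("status", 1), ⟨by tauto, h⟩, rfl⟩
      ; exact ⟨("effect", 1), ⟨by tauto, h⟩, rfl⟩
      ; exact ⟨("condition", 1), ⟨by tauto, h⟩, rfl⟩
      ; exact ⟨("validate", 2), ⟨by tauto, h⟩, rfl⟩
      ; exact ⟨("check", 2), ⟨by tauto, h⟩, rfl⟩
      ; exact ⟨("verify", 2), ⟨by tauto, h⟩, rfl⟩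
      ; exact ⟨("route", 3), ⟨by tauto, h⟩, rfl⟩
      ; exact ⟨("endpoint", 3), ⟨by tauto, h⟩, rfl⟩
      ; exact ⟨("api", 3), ⟨by tauto, h⟩, rfl⟩ ]

lemma pvMin?_cats_eq (low : String) (g : Int) (hg : g ∈ pvCatsOf low)
    (hge : ∀ x ∈ pvCatsOf low, g ≤ x) :
    PySem.List.min? (pvCatsOf low) (fun x => x) = some g := by
  cases h : PySem.List.min? (pvCatsOf low) (fun x => x) with
  | none =>
    rw [PySem.List.min?_eq_none_iff] at h
    rw [h] at hg; simp at hg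
  | some c =>
    have hc := PySem.List.min?_mem h
    have h1 : c ≤ g := PySem.List.min?_isMin h g hg
    have h2 : g ≤ c := hge c hc
    have hcg : c = g := le_antisymm h1 h2
    rw [hcg]

-- ===== VERDICT (by name: the statement is the Claim_ definition above) =====
set_option maxHeartbeats 2000000 in
theorem determine_module_for_function_py_spec : Claim_equal_determine_module_for_function_py := by
  intro func_name target_modules _ _
  unfold Spec_determine_module_for_function_py
  simp only [determine_module_for_function_py, determine_module_for_function_py_alt]
  rw [pvOuter_eval]
  have hcats : ∀ low : String,
      (pvKeywordCats.filter (fun p => PySem.Str.isIn p.1 low)).map Prod.snd = pvCatsOf low :=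
    fun _ => rfl
  rw [hcats]
  set low := PySem.Str.lower func_name with hlow
  set keys := (PySem.Dict.ofList target_modules).keys with hkeys
  have g0 : ∀ (x y z w v : Option String), PySem.List.pyGetD [x,y,z,w] (0:Int) v = x := fun _ _ _ _ _ => rfl
  have g1 : ∀ (x y z w v : Option String), PySem.List.pyGetD [x,y,z,w] (1:Int) v = y := fun _ _ _ _ _ => rfl
  have g2 : ∀ (x y z w v : Option String), PySem.List.pyGetD [x,y,z,w] (2:Int) v = z := fun _ _ _ _ _ => rfl
  have g3 : ∀ (x y z w v : Option String), PySem.List.pyGetD [x,y,z,w] (3:Int) v = w := fun _ _ _ _ _ => rfl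
  simp only [List.any_cons, List.any_nil, Bool.or_false, Option.none_or]
  split_ifs with h1 h2 h3 h4
  · -- damage / hit / attack
    simp only [Bool.or_eq_true] at h1
    have hmin : PySem.List.min? (pvCatsOf low) (fun x => x) = some 0 := by
      refine pvMin?_cats_eq low 0 ((pvMem_catsOf low 0).mpr (Or.inl ⟨h1, rfl⟩)) ?_
      intro x hx
      rcases (pvMem_catsOf low x).mp hx with ⟨_, rfl⟩|⟨_, rfl⟩|⟨_, rfl⟩|⟨_, rfl⟩ <;> omega
    rw [hmin, show (fun m => PySem.Str.isIn "damage" m) = pvP0 from rfl]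
    cases hf : keys.find? pvP0 <;> simp [hf, g0]
  · -- status / effect / condition
    simp only [Bool.or_eq_true, not_or] at h1
    simp only [Bool.or_eq_true] at h2
    have hmin : PySem.List.min? (pvCatsOf low) (fun x => x) = some 1 := by
      refine pvMin?_cats_eq low 1 ((pvMem_catsOf low 1).mpr (Or.inr (Or.inl ⟨h2, rfl⟩))) ?_
      intro x hx
      rcases (pvMem_catsOf low x).mp hx with ⟨hg, rfl⟩|⟨hg, rfl⟩|⟨hg, rfl⟩|⟨hg, rfl⟩
      · rcases hg with h|h|h
        exacts [absurd h h1.1, absurd h h1.2.1, absurd h h1.2.2]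
      · omega
      · omega
      · omega
    rw [hmin, show (fun m => PySem.Str.isIn "status" m || PySem.Str.isIn "effect" m) = pvP1 from rfl]
    cases hf : keys.find? pvP1 <;> simp [hf, g1]
  · -- validate / check / verify
    simp only [Bool.or_eq_true, not_or] at h1 h2
    simp only [Bool.or_eq_true] at h3
    have hmin : PySem.List.min? (pvCatsOf low) (fun x => x) = some 2 := by
      refine pvMin?_cats_eq low 2 ((pvMem_catsOf low 2).mpr (Or.inr (Or.inr (Or.inl ⟨h3, rfl⟩)))) ?_
      intro x hx
      rcases (pvMem_catsOf low x).mp hx with ⟨hg, rfl⟩|⟨hg, rfl⟩|⟨hg, rfl⟩|⟨hg, rfl⟩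
      · rcases hg with h|h|h
        exacts [absurd h h1.1, absurd h h1.2.1, absurd h h1.2.2]
      · rcases hg with h|h|h
        exacts [absurd h h2.1, absurd h h2.2.1, absurd h h2.2.2]
      · omega
      · omega
    rw [hmin, show (fun m => PySem.Str.isIn "validation" m) = pvP2 from rfl]
    cases hf : keys.find? pvP2 <;> simp [hf, g2]
  · -- route / endpoint / api
    simp only [Bool.or_eq_true, not_or] at h1 h2 h3
    simp only [Bool.or_eq_true] at h4
    have hmin : PySem.List.min? (pvCatsOf low) (fun x => x) = some 3 := by
      refine pvMin?_cats_eq low 3 ((pvMem_catsOf low 3).mpr (Or.inr (Or.inr (Or.inr ⟨h4, rfl⟩)))) ?_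
      intro x hx
      rcases (pvMem_catsOf low x).mp hx with ⟨hg, rfl⟩|⟨hg, rfl⟩|⟨hg, rfl⟩|⟨hg, rfl⟩
      · rcases hg with h|h|h
        exacts [absurd h h1.1, absurd h h1.2.1, absurd h h1.2.2]
      · rcases hg with h|h|h
        exacts [absurd h h2.1, absurd h h2.2.1, absurd h h2.2.2]
      · rcases hg with h|h|h
        exacts [absurd h h3.1, absurd h h3.2.1, absurd h h3.2.2]
      · omega
    rw [hmin, show (fun m => PySem.Str.isIn "router" m) = pvP3 from rfl]
    cases hf : keys.find? pvP3 <;> simp [hf, g3]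
  · -- no keyword matched: cats is empty
    simp only [Bool.or_eq_true, not_or] at h1 h2 h3 h4
    have hnil : pvCatsOf low = [] := by
      rw [List.eq_nil_iff_forall_not_mem]
      intro x hx
      rcases (pvMem_catsOf low x).mp hx with ⟨hg, _⟩|⟨hg, _⟩|⟨hg, _⟩|⟨hg, _⟩ <;>
        rcases hg with h|h|h
      exacts [absurd h h1.1, absurd h h1.2.1, absurd h h1.2.2,
        absurd h h2.1, absurd h h2.2.1, absurd h h2.2.2,
        absurd h h3.1, absurd h h3.2.1, absurd h h3.2.2,
        absurd h h4.1, absurd h h4.2.1, absurd h h4.2.2]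
    rw [hnil, show PySem.List.min? ([] : List Int) (fun x => x) = none from rfl]
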